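-- pv_equiv track=rewrite | github.com/neilwj7/advent-of-code-2025 | 9/main.py | covered_v
-- ===== SOURCE A (Python) =====
-- def covered_v(r, c, vw):
--     covered_right = covered_left = False
--     for wall in vw:
--         if not wall[1] <= r <= wall[2]:
--             continue
--         if c == wall[0]:
--             return True
--         elif c > wall[0]:
--             covered_left = True
--         else:
--             covered_right = True
--         if covered_left and covered_right:
--             return True
--     return False
-- ===== SOURCE B (Python) =====
-- def covered_v(r, c, vw):
--     xs = [w[0] for w in vw if w[1] <= r <= w[2]]
--     return any(x <= c for x in xs) and any(x >= c for x in xs)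
-- ===== Notes on version B (the rewrite author's own statement) =====
-- stated objective: simpler
-- what changed: Replaced the two-flag accumulator with early exact-hit/both-flags returns by filtering the qualifying wall x-coordinates once and checking two existence conditions (some x <= c and some x >= c), using the identity (exists x=c) or (exists x<c and exists x>c) = (exists x<=c) and (exists x>=c).
import Mathlib
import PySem

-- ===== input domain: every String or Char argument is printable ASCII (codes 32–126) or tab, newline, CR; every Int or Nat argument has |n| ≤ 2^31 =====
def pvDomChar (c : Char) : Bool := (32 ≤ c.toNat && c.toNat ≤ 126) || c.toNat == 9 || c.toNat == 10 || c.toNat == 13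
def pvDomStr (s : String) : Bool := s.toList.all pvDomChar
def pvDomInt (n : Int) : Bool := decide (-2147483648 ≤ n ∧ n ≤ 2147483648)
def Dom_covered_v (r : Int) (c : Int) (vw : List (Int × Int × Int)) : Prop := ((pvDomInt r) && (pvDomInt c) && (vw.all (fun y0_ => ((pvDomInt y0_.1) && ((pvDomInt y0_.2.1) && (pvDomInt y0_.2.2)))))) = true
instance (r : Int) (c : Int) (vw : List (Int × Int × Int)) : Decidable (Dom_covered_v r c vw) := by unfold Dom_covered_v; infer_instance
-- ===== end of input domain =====

-- B replaces A's two-flag accumulator with a single filter of qualifying x-coordinates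
-- and two existence checks (simpler decomposition; same cost).

-- ===== PORT A =====
-- loop with the two flags and the two early returns, as structural recursion over vw
def covered_v_loop (r : Int) (c : Int) (covered_right : Bool) (covered_left : Bool) :
    List (Int × Int × Int) → Bool
  | [] => false
  | wall :: rest =>
    if ¬ (wall.2.1 ≤ r ∧ r ≤ wall.2.2) then
      covered_v_loop r c covered_right covered_left rest
    else if c = wall.1 then
      true
    else
      let covered_left' := if c > wall.1 then true else covered_left
      let covered_right' := if c > wall.1 then covered_right else true
      if covered_left' && covered_right' then true
      else covered_v_loop r c covered_right' covered_left' rest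

def covered_v (r : Int) (c : Int) (vw : List (Int × Int × Int)) : Bool :=
  covered_v_loop r c false false vw

-- ===== PORT B =====
def covered_v_alt (r : Int) (c : Int) (vw : List (Int × Int × Int)) : Bool :=
  let xs := (vw.filter (fun w => decide (w.2.1 ≤ r) && decide (r ≤ w.2.2))).map (fun w => w.1)
  (xs.any (fun x => decide (x ≤ c))) && (xs.any (fun x => decide (c ≤ x)))

-- ===== PRECONDITION & SPEC =====
def Spec_covered_v (r : Int) (c : Int) (vw : List (Int × Int × Int)) (out : Bool) : Prop := out = covered_v_alt r c vw
instance (r : Int) (c : Int) (vw : List (Int × Int × Int)) (out : Bool) : Decidable (Spec_covered_v r c vw out) := by unfold Spec_covered_v; infer_instance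

-- ===== CLAIM (what is proved, stated in full; the proofs are below) =====
def Claim_equal_covered_v : Prop := ∀ (r : Int) (c : Int) (vw : List (Int × Int × Int)), Dom_covered_v r c vw → Spec_covered_v r c vw (covered_v r c vw)

-- ===== LEMMAS AND PROOFS =====

-- invariant: as long as the two flags are not both set (A would already have returned),
-- the loop computes (l ∨ ∃ x ≤ c) ∧ (rt ∨ ∃ x ≥ c) over the qualifying x's of the rest
theorem covered_v_loop_eq (r : Int) (c : Int) (rt l : Bool) (vw : List (Int × Int × Int))
    (h : ¬ (l = true ∧ rt = true)) :
    covered_v_loop r c rt l vw =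
      ((l || ((vw.filter (fun w => decide (w.2.1 ≤ r) && decide (r ≤ w.2.2))).map (fun w => w.1)).any (fun x => decide (x ≤ c))) &&
       (rt || ((vw.filter (fun w => decide (w.2.1 ≤ r) && decide (r ≤ w.2.2))).map (fun w => w.1)).any (fun x => decide (c ≤ x)))) := by
  induction vw generalizing rt l with
  | nil => cases l <;> cases rt <;> simp_all [covered_v_loop]
  | cons w ws ih =>
    by_cases hq : w.2.1 ≤ r ∧ r ≤ w.2.2
    · by_cases hc : c = w.1
      · subst hc; simp [covered_v_loop, hq]
      · by_cases hgt : c > w.1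
        · have hle : w.1 ≤ c := le_of_lt hgt
          cases rt with
          | true => simp [covered_v_loop, hq, hc, hgt, hle]
          | false =>
            rw [covered_v_loop]
            simp only [if_neg (not_not_intro hq), if_neg hc, if_pos hgt,
              Bool.and_false, Bool.false_eq_true, if_false]
            rw [ih false true (by simp)]
            simp [hq, hle]
            omega
        · have hlt : c < w.1 := lt_of_le_of_ne (not_lt.mp hgt) hc
          have hle : c ≤ w.1 := le_of_lt hlt
          cases l with
          | true =>
            rw [covered_v_loop]
            simp only [if_neg (not_not_intro hq), if_neg hc, if_neg hgt,
              Bool.and_true]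
            simp [hq, hle]
          | false =>
            rw [covered_v_loop]
            simp only [if_neg (not_not_intro hq), if_neg hc, if_neg hgt,
              Bool.false_and, Bool.false_eq_true, if_false]
            rw [ih true false (by simp)]
            simp [hq, hle]
            omega
    · rw [covered_v_loop, if_pos hq, ih rt l h]
      simp [hq]

-- ===== VERDICT (by name: the statement is the Claim_ definition above) =====
theorem covered_v_spec : Claim_equal_covered_v := by
  intro r c vw _
  unfold Spec_covered_v covered_v covered_v_alt
  rw [covered_v_loop_eq r c false false vw (by simp)]
  simp
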